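-- pv_equiv track=rewrite | github.com/MauricioCastroL/Tareas | Tareas/Proyecto_cimas_V2.py | iden_secuencias
-- ===== SOURCE A (Python) =====
-- def iden_secuencias(datos):
--     secuencia = []
--     list_secuencia = []
--     for numero in datos:
--         if numero != 0:
--             list_secuencia.append(numero)
--         else:
--             secuencia.append(list_secuencia)
--             list_secuencia = []
--     return secuencia
-- ===== SOURCE B (Python) =====
-- def iden_secuencias(datos):
--     datos = list(datos)
--     res = []
--     while 0 in datos:
--         i = datos.index(0)
--         res.append(datos[:i])
--         datos = datos[i + 1:]
--     return res
-- ===== Notes on version B (the rewrite author's own statement) =====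
-- stated objective: alternative
-- what changed: Replaces the element-by-element accumulator loop by repeated splitting: while a 0 is present, cut off the prefix before the first 0 as one segment and continue on the remainder (dropping the trailing zero-free run).
import Mathlib
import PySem

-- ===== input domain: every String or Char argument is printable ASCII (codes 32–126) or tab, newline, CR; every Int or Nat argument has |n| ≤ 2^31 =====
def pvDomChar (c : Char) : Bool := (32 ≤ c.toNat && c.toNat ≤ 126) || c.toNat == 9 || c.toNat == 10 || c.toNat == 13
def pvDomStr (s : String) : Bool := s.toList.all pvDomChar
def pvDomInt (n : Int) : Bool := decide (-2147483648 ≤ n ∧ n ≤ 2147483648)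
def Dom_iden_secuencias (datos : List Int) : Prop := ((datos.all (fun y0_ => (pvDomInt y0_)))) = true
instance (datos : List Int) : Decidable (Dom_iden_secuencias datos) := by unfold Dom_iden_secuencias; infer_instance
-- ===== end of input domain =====

-- B replaces A's element-by-element accumulator loop by repeated splitting at the first 0; return values proved equal on all inputs.

-- ===== PORT A =====
-- loop body: if numero != 0 append to list_secuencia, else push list_secuencia and reset
def pvStepA (st : List (List Int) × List Int) (numero : Int) : List (List Int) × List Int :=
  if numero ≠ 0 then (st.1, st.2 ++ [numero]) else (st.1 ++ [st.2], [])

def iden_secuencias (datos : List Int) : List (List Int) :=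
  (datos.foldl pvStepA ([], [])).1

-- ===== PORT B =====
-- while 0 in datos: i = datos.index(0); res.append(datos[:i]); datos = datos[i+1:]
-- (index? is none exactly when 0 ∉ datos, i.e. the while-condition; for the Nat index i,
--  datos[:i] = take i and datos[i+1:] = drop (i+1), exact since 0 ≤ i)
def idenAltGo (xs : List Int) : List (List Int) :=
  match h : PySem.List.index? xs 0 with
  | none => []
  | some i => xs.take i :: idenAltGo (xs.drop (i + 1))
termination_by xs.length
decreasing_by
  obtain ⟨hk, -, -⟩ := PySem.List.getElem_of_index?_eq_some h
  simp; omega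

def iden_secuencias_alt (datos : List Int) : List (List Int) := idenAltGo datos

-- ===== PRECONDITION & SPEC =====
def Spec_iden_secuencias (datos : List Int) (out : List (List Int)) : Prop := out = iden_secuencias_alt datos
instance (datos : List Int) (out : List (List Int)) : Decidable (Spec_iden_secuencias datos out) := by unfold Spec_iden_secuencias; infer_instance

-- ===== CLAIM (what is proved, stated in full; the proofs are below) =====
def Claim_equal_iden_secuencias : Prop := ∀ (datos : List Int), Dom_iden_secuencias datos → Spec_iden_secuencias datos (iden_secuencias datos)

-- ===== LEMMAS AND PROOFS =====

theorem idenAltGo_eq (xs : List Int) :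
    idenAltGo xs = match PySem.List.index? xs 0 with
      | none => []
      | some i => xs.take i :: idenAltGo (xs.drop (i + 1)) := by
  rw [idenAltGo.eq_def]
  split <;> rename_i h <;> rw [h]

theorem foldA_fst_append (xs : List Int) (sec : List (List Int)) (cur : List Int) :
    (xs.foldl pvStepA (sec, cur)).1 = sec ++ (xs.foldl pvStepA ([], cur)).1 := by
  induction xs generalizing sec cur with
  | nil => simp
  | cons n xs ih =>
    simp only [List.foldl_cons, pvStepA]
    by_cases h : n = 0 <;> simp only [h, if_pos, if_neg, ne_eq, not_true_eq_false,
      not_false_eq_true]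
    · rw [ih (sec ++ [cur]) [], ih ([] ++ [cur]) []]; simp
    · exact ih sec (cur ++ [n])

theorem foldA_eq_split (xs : List Int) (cur : List Int) :
    (xs.foldl pvStepA ([], cur)).1 = match PySem.List.index? xs 0 with
      | none => []
      | some i => (cur ++ xs.take i) :: idenAltGo (xs.drop (i + 1)) := by
  induction xs generalizing cur with
  | nil =>
    rw [PySem.List.index?_eq_idxOf?]
    simp
  | cons n xs ih =>
    by_cases h : n = 0
    · subst h
      rw [PySem.List.index?_cons_self]
      simp only [List.foldl_cons, pvStepA, ne_eq, not_true_eq_false, ite_false,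
        List.nil_append, List.take_zero, List.append_nil, List.drop_succ_cons, List.drop_zero]
      rw [foldA_fst_append xs [cur] []]
      have hC : (xs.foldl pvStepA ([], [])).1 = idenAltGo xs := by
        rw [ih [], idenAltGo_eq xs]
        cases PySem.List.index? xs 0 <;> simp
      rw [hC]; rfl
    · simp only [List.foldl_cons, pvStepA, ne_eq, h, not_false_eq_true, ite_true]
      rw [ih (cur ++ [n]), PySem.List.index?_cons_of_ne _ h]
      cases PySem.List.index? xs 0 with
      | none => rfl
      | some i => simp

-- ===== VERDICT (by name: the statement is the Claim_ definition above) =====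
theorem iden_secuencias_spec : Claim_equal_iden_secuencias := by
  intro datos _
  show iden_secuencias datos = iden_secuencias_alt datos
  unfold iden_secuencias iden_secuencias_alt
  rw [foldA_eq_split datos [], idenAltGo_eq datos]
  cases PySem.List.index? datos 0 <;> simp
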